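-- pv_equiv track=rewrite | github.com/ViddySlap/steam-deck-vj | deck/xinput_send.py | build_action_token_index
-- ===== SOURCE A (Python) =====
-- def build_action_token_index(bindings: dict[str, str]) -> dict[str, list[str]]:
--     action_tokens: dict[str, list[str]] = {}
--     for token, action in bindings.items():
--         action_tokens.setdefault(action, []).append(token)
--     for action in action_tokens:
--         action_tokens[action].sort(
--             key=lambda token: (0, int(token)) if token.isdigit() else (1, token)
--         )
--     return action_tokens
-- ===== SOURCE B (Python) =====
-- def build_action_token_index(bindings: dict[str, str]) -> dict[str, list[str]]:
--     # No dict accumulation and no per-bucket sort: sort all items once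
--     # globally by the token key (sort stability keeps tie order), collect the
--     # distinct actions in first-appearance order, and build each bucket by
--     # filtering the pre-sorted item list.
--     ordered = sorted(
--         bindings.items(),
--         key=lambda kv: (0, int(kv[0])) if kv[0].isdigit() else (1, kv[0]),
--     )
--     actions = list(dict.fromkeys(bindings.values()))
--     return {a: [t for t, act in ordered if act == a] for a in actions}
-- ===== Notes on version B (the rewrite author's own statement) =====
-- stated objective: alternative
-- what changed: A groups tokens into per-action buckets with setdefault and then sorts each bucket; B keeps no dict accumulator at all: it sorts all items once globally by the token key, takes the distinct actions in first-appearance order, and builds each bucket by filtering the pre-sorted list (stability makes every bucket already sorted).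
import Mathlib
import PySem

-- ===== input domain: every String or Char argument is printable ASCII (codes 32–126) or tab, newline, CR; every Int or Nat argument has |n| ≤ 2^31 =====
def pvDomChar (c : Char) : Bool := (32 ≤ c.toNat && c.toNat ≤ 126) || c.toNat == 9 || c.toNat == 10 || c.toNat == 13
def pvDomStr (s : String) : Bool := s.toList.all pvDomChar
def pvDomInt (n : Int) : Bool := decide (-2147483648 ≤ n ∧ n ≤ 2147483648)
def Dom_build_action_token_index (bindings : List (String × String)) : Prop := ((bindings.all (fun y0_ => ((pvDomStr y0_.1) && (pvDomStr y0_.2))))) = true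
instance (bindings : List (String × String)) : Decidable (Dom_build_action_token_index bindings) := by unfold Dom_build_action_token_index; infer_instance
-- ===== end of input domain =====

-- B keeps no dict accumulator: it sorts all items once globally by the token key and builds
-- each distinct action's bucket by filtering the pre-sorted list; objective: alternative.

-- Python's sort key '(0, int(token)) if token.isdigit() else (1, token)' encoded as an
-- integer list with the same lexicographic order (exact: the int/str second components are
-- never cross-compared, and Python's str '<' is code-point lexicographic).
def pvKey (t : String) : List Int :=
  if PySem.Str.strIsdigit t then [0, (PySem.Int.ofStr? t).getD 0]
  else 1 :: t.toList.map (fun c => (c.toNat : Int))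

-- the dict argument: its items in insertion order (duplicate tokens collapse as in dict())
def pvItems (bindings : List (String × String)) : List (String × String) :=
  (bindings.foldl (fun d p => d.insert p.1 p.2) (PySem.Dict.empty : PySem.Dict String String)).items

-- ===== PORT A =====
def build_action_token_index (bindings : List (String × String)) : List (String × List String) :=
  let items := pvItems bindings
  let action_tokens : PySem.Dict String (List String) :=
    items.foldl (fun d p => d.modify p.2 [] (fun ts => ts ++ [p.1])) PySem.Dict.empty
  action_tokens.items.map (fun q => (q.1, PySem.List.sorted q.2 pvKey))

-- ===== PORT B =====
def build_action_token_index_alt (bindings : List (String × String)) : List (String × List String) :=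
  let items := pvItems bindings
  let ordered := PySem.List.sorted items (fun kv => pvKey kv.1)
  let actions := PySem.List.dedup (items.map (fun p => p.2))
  actions.map (fun a => (a, (ordered.filter (fun p => p.2 == a)).map (fun p => p.1)))

-- ===== PRECONDITION & SPEC =====
def Spec_build_action_token_index (bindings : List (String × String)) (out : List (String × List String)) : Prop := out = build_action_token_index_alt bindings
instance (bindings : List (String × String)) (out : List (String × List String)) : Decidable (Spec_build_action_token_index bindings out) := by unfold Spec_build_action_token_index; infer_instance

-- ===== CLAIM (what is proved, stated in full; the proofs are below) =====
def Claim_equal_build_action_token_index : Prop := ∀ (bindings : List (String × String)), Dom_build_action_token_index bindings → Spec_build_action_token_index bindings (build_action_token_index bindings)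

-- ===== LEMMAS AND PROOFS =====

theorem pv_lt_of_lt_of_not_lt {a b c : List Int} (h1 : a < b) (h2 : ¬ c < b) : a < c := by
  exact lt_of_lt_of_le h1 (not_lt.mp h2)

theorem pv_insertBy_all_before {α : Type} (before : α → α → Bool) (u : α) (zs : List α)
    (h : ∀ v ∈ zs, before u v = true) :
    PySem.List.insertBy before u zs = u :: zs := by
  cases zs with
  | nil => simp [PySem.List.insertBy]
  | cons y ys => simp [PySem.List.insertBy, h y (by simp)]

theorem pv_insertBy_pairwise (ys : List (String × String))
    (h : ys.Pairwise (fun p q => ¬ pvKey q.1 < pvKey p.1)) (x : String × String) :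
    (PySem.List.insertBy (fun p q => decide (pvKey p.1 < pvKey q.1)) x ys).Pairwise
      (fun p q => ¬ pvKey q.1 < pvKey p.1) := by
  induction ys with
  | nil => simp [PySem.List.insertBy]
  | cons y t ih =>
    have hy : ∀ w ∈ t, ¬ pvKey w.1 < pvKey y.1 := (List.pairwise_cons.mp h).1
    have ht := (List.pairwise_cons.mp h).2
    by_cases hlt : pvKey x.1 < pvKey y.1
    · rw [show PySem.List.insertBy (fun p q => decide (pvKey p.1 < pvKey q.1)) x (y :: t)
            = x :: y :: t by simp [PySem.List.insertBy, hlt]]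
      refine List.pairwise_cons.mpr ⟨?_, h⟩
      intro w hw
      rcases List.mem_cons.mp hw with rfl | hw
      · exact asymm hlt
      · intro hc; exact (hy w hw) (_root_.trans hc hlt)
    · rw [show PySem.List.insertBy (fun p q => decide (pvKey p.1 < pvKey q.1)) x (y :: t)
            = y :: PySem.List.insertBy (fun p q => decide (pvKey p.1 < pvKey q.1)) x t
          by simp [PySem.List.insertBy, hlt]]
      refine List.pairwise_cons.mpr ⟨?_, ih ht⟩
      intro w hw
      rcases (PySem.List.mem_insertBy _ _ _ _).mp hw with rfl | hw
      · exact hlt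
      · exact hy w hw

theorem pv_sorted_append {α κ : Type} [LT κ] [DecidableLT κ] (xs : List α) (x : α) (key : α → κ) :
    PySem.List.sorted (xs ++ [x]) key
    = PySem.List.insertBy (fun a b => decide (key a < key b)) x (PySem.List.sorted xs key) := by
  rw [PySem.List.sorted_eq_foldl_insertBy, PySem.List.sorted_eq_foldl_insertBy, List.foldl_append]
  simp

theorem pv_pairwise_sorted (l : List (String × String)) :
    (PySem.List.sorted l (fun kv => pvKey kv.1)).Pairwise (fun p q => ¬ pvKey q.1 < pvKey p.1) := by
  induction l using List.reverseRecOn with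
  | nil => rw [PySem.List.sorted_eq_foldl_insertBy]; simp
  | append_singleton t x ih => rw [pv_sorted_append]; exact pv_insertBy_pairwise _ ih x

theorem pv_insertBy_filter_map (a : String) (ys : List (String × String))
    (hys : ys.Pairwise (fun p q => ¬ pvKey q.1 < pvKey p.1)) (x : String × String) :
    ((PySem.List.insertBy (fun p q => decide (pvKey p.1 < pvKey q.1)) x ys).filter
        (fun p => p.2 == a)).map (fun p => p.1)
    = if x.2 == a then
        PySem.List.insertBy (fun s t => decide (pvKey s < pvKey t)) x.1
          ((ys.filter (fun p => p.2 == a)).map (fun p => p.1))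
      else (ys.filter (fun p => p.2 == a)).map (fun p => p.1) := by
  induction ys with
  | nil =>
    by_cases hx : (x.2 == a) <;> simp [PySem.List.insertBy, hx]
  | cons y t ih =>
    have hyt : ∀ w ∈ t, ¬ pvKey w.1 < pvKey y.1 := (List.pairwise_cons.mp hys).1
    have htp := (List.pairwise_cons.mp hys).2
    by_cases hlt : pvKey x.1 < pvKey y.1
    · rw [show PySem.List.insertBy (fun p q => decide (pvKey p.1 < pvKey q.1)) x (y :: t)
            = x :: y :: t by simp [PySem.List.insertBy, hlt]]
      by_cases hx : (x.2 == a)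
      · by_cases hy : (y.2 == a)
        · simp [hx, hy]
          rw [pv_insertBy_all_before]
          intro v hv
          simp only [List.mem_cons] at hv
          rcases hv with rfl | hv
          · simpa using hlt
          · simp only [List.mem_map, List.mem_filter] at hv
            obtain ⟨p, ⟨hp, _⟩, rfl⟩ := hv
            simpa using pv_lt_of_lt_of_not_lt hlt (hyt p hp)
        · simp [hx, hy]
          rw [pv_insertBy_all_before]
          intro v hv
          simp only [List.mem_map, List.mem_filter] at hv
          obtain ⟨p, ⟨hp, _⟩, rfl⟩ := hv
          simpa using pv_lt_of_lt_of_not_lt hlt (hyt p hp)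
      · simp [hx]
    · rw [show PySem.List.insertBy (fun p q => decide (pvKey p.1 < pvKey q.1)) x (y :: t)
            = y :: PySem.List.insertBy (fun p q => decide (pvKey p.1 < pvKey q.1)) x t
          by simp [PySem.List.insertBy, hlt]]
      by_cases hy : (y.2 == a)
      · by_cases hx : (x.2 == a) <;>
          simp [hy, hx, ih htp, PySem.List.insertBy, hlt]
      · by_cases hx : (x.2 == a) <;> simp [hy, hx, ih htp]

theorem pv_sorted_filter_map (l : List (String × String)) (a : String) :
    PySem.List.sorted ((l.filter (fun p => p.2 == a)).map (fun p => p.1)) pvKey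
    = ((PySem.List.sorted l (fun kv => pvKey kv.1)).filter (fun p => p.2 == a)).map (fun p => p.1) := by
  induction l using List.reverseRecOn with
  | nil =>
    rw [PySem.List.sorted_eq_foldl_insertBy, PySem.List.sorted_eq_foldl_insertBy]
    simp
  | append_singleton t x ih =>
    rw [pv_sorted_append t x, pv_insertBy_filter_map a _ (pv_pairwise_sorted t) x,
        List.filter_append, List.map_append]
    by_cases hx : (x.2 == a)
    · rw [if_pos hx]
      simp only [List.filter_cons, hx, if_pos, List.filter_nil, List.map_cons, List.map_nil]
      rw [pv_sorted_append, ih]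
    · have hx' : (x.2 == a) = false := by simpa using hx
      rw [if_neg (by simp [hx'])]
      simp only [List.filter_cons, hx', Bool.false_eq_true, if_false, List.filter_nil,
        List.map_nil, List.append_nil]
      exact ih

theorem pv_bucket (l : List (String × String)) (a : String) :
    (l.foldl (fun d p => d.modify p.2 [] (fun ts => ts ++ [p.1]))
      (PySem.Dict.empty : PySem.Dict String (List String))).getD a []
    = ((l.filter (fun p => p.2 == a)).map (fun p => p.1)) := by
  have h : l.foldl (fun d p => d.modify p.2 [] (fun ts => ts ++ [p.1]))
      (PySem.Dict.empty : PySem.Dict String (List String))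
      = (l.map Prod.swap).foldl (fun d p => d.modify p.1 [] (fun ts => ts ++ [p.2]))
        (PySem.Dict.empty : PySem.Dict String (List String)) := by
    rw [List.foldl_map]; rfl
  rw [h, PySem.Dict.getD_foldl_modify_append]
  simp [List.filter_map, List.map_map, Function.comp_def, Prod.swap]

theorem pv_main (bindings : List (String × String)) :
    build_action_token_index bindings = build_action_token_index_alt bindings := by
  unfold build_action_token_index build_action_token_index_alt
  dsimp only
  set items := pvItems bindings with hitems
  set G := items.foldl (fun d p => d.modify p.2 [] (fun ts => ts ++ [p.1]))
    (PySem.Dict.empty : PySem.Dict String (List String)) with hG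
  have hGk : G.keys = PySem.Set.ofList (items.map (fun p => p.2)) := by
    rw [hG, PySem.Dict.keys_foldl_modify_key items (fun p => p.2) []
      (fun d p => fun ts => ts ++ [p.1])]
    simp [PySem.Set.update, PySem.Set.ofList_eq_foldl, PySem.Dict.keys, PySem.Dict.empty]
  have hGn : G.keys.Nodup := by
    rw [hG]
    exact PySem.Dict.nodup_keys_foldl_modify_key items (fun p => p.2) []
      (fun d p => fun ts => ts ++ [p.1]) _ (by simp [PySem.Dict.keys, PySem.Dict.empty])
  rw [PySem.Dict.items_eq_map_keys G hGn [], List.map_map, hGk,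
      PySem.List.dedup_eq_ofList]
  apply List.map_congr_left
  intro k hk
  simp only [Function.comp_apply]
  rw [pv_bucket items k, pv_sorted_filter_map items k]

-- ===== VERDICT (by name: the statement is the Claim_ definition above) =====
theorem build_action_token_index_spec : Claim_equal_build_action_token_index := by
  unfold Claim_equal_build_action_token_index Spec_build_action_token_index
  intro bindings _
  exact pv_main bindings
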